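-- pv_equiv track=rewrite | github.com/taking-lyingflat/AcWing_Algorithm_Fundamental_Course | 1. 基础算法/AcWing_0799.py | foo
-- ===== SOURCE A (Python) =====
-- from typing import List
-- from collections import defaultdict
--
-- def foo(nums: List[int]) -> int:
--     left = 0
--     ans = 0
--     cnt = defaultdict(int)
--     for right, x in enumerate(nums):
--         cnt[x] += 1
--         while left <= right and cnt[x] >= 2:
--             cnt[nums[left]] -= 1
--             left += 1
--         ans = max(ans, right - left + 1)
--     return ans
-- ===== SOURCE B (Python) =====
-- from typing import List
--
--
-- def foo(nums: List[int]) -> int: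
--     left = 0
--     ans = 0
--     last = {}
--     for right, x in enumerate(nums):
--         left = max(left, last.get(x, -1) + 1)
--         last[x] = right
--         ans = max(ans, right - left + 1)
--     return ans
-- ===== Notes on version B (the rewrite author's own statement) =====
-- stated objective: idiomatic
-- what changed: Replaces A's count dictionary plus inner while-loop window shrink by a last-seen-index dictionary: left jumps directly past the previous occurrence via max(left, last.get(x,-1)+1), eliminating the inner loop and the element-by-element decrementing.
import Mathlib
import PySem

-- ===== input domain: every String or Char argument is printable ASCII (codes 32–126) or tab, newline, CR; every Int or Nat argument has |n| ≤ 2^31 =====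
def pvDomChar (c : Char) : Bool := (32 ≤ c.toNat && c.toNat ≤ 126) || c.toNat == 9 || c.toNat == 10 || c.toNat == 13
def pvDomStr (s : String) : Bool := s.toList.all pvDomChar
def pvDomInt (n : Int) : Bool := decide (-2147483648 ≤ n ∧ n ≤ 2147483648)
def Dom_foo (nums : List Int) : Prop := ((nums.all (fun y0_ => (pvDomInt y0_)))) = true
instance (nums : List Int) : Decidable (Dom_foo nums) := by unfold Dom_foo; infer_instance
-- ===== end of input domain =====

-- B replaces A's count dict + inner while-loop window shrink by a last-seen-index dict with a direct left jump (idiomatic; same cost).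

-- ===== PORT A =====
-- the inner 'while left <= right and cnt[x] >= 2' loop; fuel = right + 1 - left bounds its iterations
def fooShrink (nums : List Int) (x : Int) (r : Int) : Nat → Int → PySem.Dict Int Int → Int × PySem.Dict Int Int
  | 0, left, cnt => (left, cnt)
  | fuel + 1, left, cnt =>
    if left ≤ r ∧ cnt.getD x 0 ≥ 2 then
      let v := (PySem.List.pyGet? nums left).getD 0   -- nums[left]; in range whenever 0 ≤ left ≤ r < len(nums)
      fooShrink nums x r fuel (left + 1) (cnt.modify v 0 (· - 1))
    else (left, cnt)

-- the outer 'for right, x in enumerate(nums)' loop, r = current index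
def fooLoop (nums : List Int) : List Int → Int → Int → Int → PySem.Dict Int Int → Int
  | [], _, _, ans, _ => ans
  | x :: rest, r, left, ans, cnt =>
      let cnt := cnt.modify x 0 (· + 1)
      let p := fooShrink nums x r (r + 1 - left).toNat left cnt
      fooLoop nums rest (r + 1) p.1 (max ans (r - p.1 + 1)) p.2

def foo (nums : List Int) : Int := fooLoop nums nums 0 0 0 PySem.Dict.empty

-- ===== PORT B =====
def fooAltLoop : List Int → Int → Int → Int → PySem.Dict Int Int → Int
  | [], _, _, ans, _ => ans
  | x :: rest, r, left, ans, last =>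
      let left := max left (last.getD x (-1) + 1)
      let last := last.insert x r
      fooAltLoop rest (r + 1) left (max ans (r - left + 1)) last

def foo_alt (nums : List Int) : Int := fooAltLoop nums 0 0 0 PySem.Dict.empty

-- ===== PRECONDITION & SPEC =====
def Spec_foo (nums : List Int) (out : Int) : Prop := out = foo_alt nums
instance (nums : List Int) (out : Int) : Decidable (Spec_foo nums out) := by unfold Spec_foo; infer_instance

-- ===== CLAIM (what is proved, stated in full; the proofs are below) =====
def Claim_equal_foo : Prop := ∀ (nums : List Int), Dom_foo nums → Spec_foo nums (foo nums)

-- ===== LEMMAS AND PROOFS =====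

-- index of the LAST occurrence of v in l, or -1 if absent (what B's dict 'last' records)
def lastIdx : List Int → Int → Int
  | [], _ => -1
  | a :: t, v => if v ∈ t then 1 + lastIdx t v else if a = v then 0 else -1

lemma lastIdx_lt_length (l : List Int) (v : Int) : lastIdx l v < l.length := by
  induction l with
  | nil => simp [lastIdx]
  | cons a t ih =>
    simp only [lastIdx, List.length_cons]
    split_ifs <;> push_cast <;> omega

lemma lastIdx_nonneg_of_mem {l : List Int} {v : Int} (h : v ∈ l) : 0 ≤ lastIdx l v := by
  induction l with
  | nil => simp at h
  | cons a t ih =>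
    simp only [lastIdx]
    by_cases hm : v ∈ t
    · have := ih hm; simp only [hm, if_true]; omega
    · have ha : a = v := by
        rcases List.mem_cons.mp h with h' | h'
        · exact h'.symm
        · exact absurd h' hm
      simp [hm, ha]

lemma lastIdx_of_not_mem {l : List Int} {v : Int} (h : v ∉ l) : lastIdx l v = -1 := by
  induction l with
  | nil => rfl
  | cons a t ih =>
    simp only [List.mem_cons, not_or] at h
    have hav : ¬ a = v := fun hh => h.1 hh.symm
    simp [lastIdx, h.2, hav]

lemma lastIdx_append (l1 l2 : List Int) (v : Int) :
    lastIdx (l1 ++ l2) v = if v ∈ l2 then (l1.length : Int) + lastIdx l2 v else lastIdx l1 v := by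
  induction l1 with
  | nil =>
    by_cases h : v ∈ l2
    · simp [h]
    · simp [h, lastIdx, lastIdx_of_not_mem h]
  | cons a t ih =>
    simp only [List.cons_append, lastIdx, List.mem_append, ih, List.length_cons]
    by_cases h2 : v ∈ l2
    · by_cases ht : v ∈ t <;> simp [h2, ht] <;> ring
    · by_cases ht : v ∈ t <;> simp [h2, ht]

lemma lastIdx_append_singleton (l : List Int) (a v : Int) :
    lastIdx (l ++ [a]) v = if v = a then (l.length : Int) else lastIdx l v := by
  rw [lastIdx_append]
  by_cases h : v = a <;> simp [h, lastIdx]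

lemma lastIdx_take_of_not_mem_drop {pre : List Int} {leftN : Nat} {x : Int}
    (hle : leftN ≤ pre.length) (hx : x ∉ pre.drop leftN) :
    lastIdx pre x < (leftN : Int) := by
  conv_lhs => rw [← List.take_append_drop leftN pre]
  rw [lastIdx_append, if_neg hx]
  have h1 : lastIdx (pre.take leftN) x < ((pre.take leftN).length : Int) := lastIdx_lt_length _ x
  have h2 : (pre.take leftN).length = leftN := by simp [hle]
  omega

-- the key shrink characterisation: starting from the counts of (W ++ [x]) over the window
-- W = pre.drop leftN (nodup), the inner loop advances left to exactly max left (lastIdx pre x + 1)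
-- and leaves the counts of the shrunk window (with x appended), which no longer contains x.
lemma shrink_spec (x : Int) (rest : List Int) :
    ∀ (W : List Int) (pre : List Int) (leftN : Nat) (cnt : PySem.Dict Int Int) (fuel : Nat),
    pre.drop leftN = W → leftN + W.length = pre.length → W.Nodup →
    (∀ v, cnt.getD v 0 = (((W ++ [x]).count v : Nat) : Int)) → W.length + 1 ≤ fuel →
    ∃ k : Nat, k ≤ W.length ∧
      (fooShrink (pre ++ x :: rest) x (pre.length) fuel (leftN : Int) cnt).1 = ((leftN + k : Nat) : Int) ∧
      (∀ v, (fooShrink (pre ++ x :: rest) x (pre.length) fuel (leftN : Int) cnt).2.getD v 0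
            = ((((W.drop k) ++ [x]).count v : Nat) : Int)) ∧
      x ∉ W.drop k ∧
      ((leftN + k : Nat) : Int) = max (leftN : Int) (lastIdx pre x + 1) := by
  intro W
  induction W with
  | nil =>
    intro pre leftN cnt fuel hdrop hlen hnodup hcnt hfuel
    refine ⟨0, le_refl _, ?_⟩
    have hx : cnt.getD x 0 = 1 := by have := hcnt x; simpa using this
    have hstop : ∀ fuel, (fooShrink (pre ++ x :: rest) x (pre.length) fuel (leftN : Int) cnt) = ((leftN : Int), cnt) := by
      intro fuel
      cases fuel with
      | zero => rfl
      | succ f =>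
        simp only [fooShrink, hx]
        rw [if_neg]; omega
    rw [hstop]
    refine ⟨by simp, fun v => by simpa using hcnt v, by simp, ?_⟩
    have hnm : x ∉ pre.drop leftN := by rw [hdrop]; simp
    have := lastIdx_take_of_not_mem_drop (by omega) hnm
    simp only [Nat.add_zero]
    rw [max_eq_left (by omega)]
  | cons h t ih =>
    intro pre leftN cnt fuel hdrop hlen hnodup hcnt hfuel
    have hleftlt : leftN < pre.length := by simp at hlen; omega
    by_cases hxW : x ∈ h :: t
    · -- x is in the window: the loop fires and pops the head
      have hcntx : cnt.getD x 0 ≥ 2 := by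
        have := hcnt x
        have hc : 0 < (h :: t).count x := List.count_pos_iff.mpr hxW
        rw [this]
        have heq : ((h :: t) ++ [x]).count x = (h :: t).count x + 1 := by
          by_cases hhx : h = x <;> simp [List.count_append, hhx]
        rw [heq]; omega
      obtain ⟨f, rfl⟩ : ∃ f, fuel = f + 1 := ⟨fuel - 1, by omega⟩
      have hget : (PySem.List.pyGet? (pre ++ x :: rest) ((leftN : Nat) : Int)).getD 0 = h := by
        have hp : pre[leftN]? = some h := by
          have h0 : (pre.drop leftN)[0]? = some h := by rw [hdrop]; rfl
          rw [List.getElem?_drop] at h0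
          simpa using h0
        have hsome : (pre ++ x :: rest)[leftN]? = some h := by
          rw [List.getElem?_append_left hleftlt]; exact hp
        simp only [PySem.List.pyGet?, PySem.List.pyIdx?]
        rw [if_pos (show (0:Int) ≤ (leftN : Int) from Int.natCast_nonneg _)]
        rw [if_pos (show ((leftN : Int)) < (((pre ++ x :: rest).length : Nat) : Int) by simp; omega)]
        simp [hsome]
      have hcond : ((leftN : Int) ≤ (pre.length : Int) ∧ cnt.getD x 0 ≥ 2) := ⟨by omega, hcntx⟩
      have hstep : fooShrink (pre ++ x :: rest) x (pre.length) (f + 1) (leftN : Int) cnt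
          = fooShrink (pre ++ x :: rest) x (pre.length) f ((leftN : Int) + 1) (cnt.modify h 0 (· - 1)) := by
        simp only [fooShrink, if_pos hcond, hget]
      have hdropsucc : pre.drop (leftN + 1) = t := by
        have h1 : pre.drop (leftN + 1) = (pre.drop leftN).drop 1 := by rw [List.drop_drop]
        rw [h1, hdrop]; rfl
      have hcnt' : ∀ v, (cnt.modify h 0 (· - 1)).getD v 0 = (((t ++ [x]).count v : Nat) : Int) := by
        intro v
        rw [PySem.Dict.getD_modify]
        have hv := hcnt v
        have hh := hcnt h
        have hcc : ((h :: t) ++ [x]).count v = (t ++ [x]).count v + if h = v then 1 else 0 := by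
          by_cases hhv : h = v <;> simp [List.count_cons, hhv]
        by_cases hvh : v = h
        · subst hvh
          rw [if_pos rfl, hh]
          have heq2 : ((v :: t) ++ [x]).count v = (t ++ [x]).count v + 1 := by
            simp [List.count_cons]
          rw [heq2]; push_cast; ring
        · rw [if_neg hvh, hv, hcc, if_neg (fun hh' => hvh hh'.symm)]
          push_cast; ring
      have hlen' : (leftN + 1) + t.length = pre.length := by simp at hlen ⊢; omega
      obtain ⟨k', hk'le, hres1, hres2, hres3, hres4⟩ :=
        ih pre (leftN + 1) (cnt.modify h 0 (· - 1)) f hdropsucc hlen' hnodup.of_cons hcnt' (by simp at hfuel; omega)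
      refine ⟨k' + 1, by simpa using Nat.succ_le_succ hk'le, ?_, ?_, ?_, ?_⟩
      · rw [hstep]
        push_cast at hres1 ⊢
        rw [show ((leftN : Int) + 1) = (((leftN + 1 : Nat)) : Int) by push_cast; ring] at hres1 ⊢
        rw [hres1]; push_cast; ring
      · intro v
        rw [hstep]
        rw [show ((leftN : Int) + 1) = (((leftN + 1 : Nat)) : Int) by push_cast; ring]
        simpa using hres2 v
      · simpa using hres3
      · have hLge : lastIdx pre x ≥ (leftN : Int) := by
          conv_lhs => rw [← List.take_append_drop leftN pre]
          rw [lastIdx_append, if_pos (by rw [hdrop]; exact hxW)]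
          have h2 : ((pre.take leftN).length : Int) = leftN := by
            simp [le_of_lt hleftlt]
          rw [h2]
          have := lastIdx_nonneg_of_mem hxW
          rw [hdrop]; omega
        push_cast at hres4 ⊢
        omega
    · -- x is not in the window: the loop does not fire
      have hx1 : cnt.getD x 0 = 1 := by
        have := hcnt x
        have hc : (h :: t).count x = 0 := List.count_eq_zero.mpr hxW
        rw [this]
        have heq : ((h :: t) ++ [x]).count x = 1 := by
          rw [List.count_append, hc]; simp
        rw [heq]; simp
      refine ⟨0, by simp, ?_⟩
      have hstop : (fooShrink (pre ++ x :: rest) x (pre.length) fuel (leftN : Int) cnt) = ((leftN : Int), cnt) := by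
        cases fuel with
        | zero => rfl
        | succ f =>
          simp only [fooShrink, hx1]
          rw [if_neg]; omega
      rw [hstop]
      refine ⟨by simp, fun v => by simpa using hcnt v, by simpa using hxW, ?_⟩
      have hnm : x ∉ pre.drop leftN := by rw [hdrop]; exact hxW
      have := lastIdx_take_of_not_mem_drop (le_of_lt hleftlt) hnm
      simp only [Nat.add_zero]
      rw [max_eq_left (by omega)]

-- the outer loops run in lock-step: same left, same ans, linked dictionaries
lemma loop_spec :
    ∀ (rest pre : List Int) (leftN : Nat) (ans : Int) (cnt last : PySem.Dict Int Int),
    leftN ≤ pre.length →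
    (pre.drop leftN).Nodup →
    (∀ v, cnt.getD v 0 = ((((pre.drop leftN)).count v : Nat) : Int)) →
    (∀ v, last.getD v (-1) = lastIdx pre v) →
    fooLoop (pre ++ rest) rest (pre.length) (leftN : Int) ans cnt
      = fooAltLoop rest (pre.length) (leftN : Int) ans last := by
  intro rest
  induction rest with
  | nil => intro pre leftN ans cnt last _ _ _ _; rfl
  | cons x rest ih =>
    intro pre leftN ans cnt last hle hnodup hcnt hlast
    set W := pre.drop leftN with hW
    have hWlen : leftN + W.length = pre.length := by simp [hW]; omega
    have hcnt1 : ∀ v, (cnt.modify x 0 (· + 1)).getD v 0 = (((W ++ [x]).count v : Nat) : Int) := by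
      intro v
      rw [PySem.Dict.getD_modify]
      have hcc : (W ++ [x]).count v = W.count v + if x = v then 1 else 0 := by
        by_cases hxv : x = v <;> simp [List.count_append, hxv]
      by_cases hvx : v = x
      · subst hvx; rw [if_pos rfl, hcnt v, hcc, if_pos rfl]; push_cast; ring
      · rw [if_neg hvx, hcnt v, hcc, if_neg (fun hh' => hvx hh'.symm)]; push_cast; ring
    have hfuel : (((pre.length : Int)) + 1 - (leftN : Int)).toNat = W.length + 1 := by omega
    obtain ⟨k, hkle, hres1, hres2, hres3, hres4⟩ :=
      shrink_spec x rest W pre leftN (cnt.modify x 0 (· + 1)) (W.length + 1) hW.symm hWlen hnodup hcnt1 (le_refl _)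
    simp only [fooLoop, fooAltLoop]
    rw [hfuel, hres1, hlast x, ← hres4]
    have hpre' : pre ++ x :: rest = (pre ++ [x]) ++ rest := by simp
    have hlen' : (pre ++ [x]).length = pre.length + 1 := by simp
    have hdrop' : (pre ++ [x]).drop (leftN + k) = W.drop k ++ [x] := by
      rw [List.drop_append_of_le_length (by omega), hW, List.drop_drop, Nat.add_comm]
    have happly := ih (pre ++ [x]) (leftN + k) (max ans ((pre.length : Int) - ((leftN + k : Nat) : Int) + 1))
        (fooShrink (pre ++ x :: rest) x (pre.length) (W.length + 1) (leftN : Int) (cnt.modify x 0 (· + 1))).2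
        (last.insert x (pre.length))
        (by simp; omega)
        (by rw [hdrop']
            refine List.Nodup.append ((hnodup.sublist (List.drop_sublist k W))) (by simp) ?_
            intro a ha hb
            simp at hb; subst hb; exact hres3 ha)
        (by intro v; rw [hdrop']; exact hres2 v)
        (by intro v
            rw [PySem.Dict.getD_insert, lastIdx_append_singleton]
            by_cases hvx : v = x <;> simp [hvx, hlast v])
    rw [hpre'] at happly ⊢
    rw [hlen'] at happly
    push_cast at happly ⊢
    convert happly using 2

-- ===== VERDICT (by name: the statement is the Claim_ definition above) =====
theorem foo_spec : Claim_equal_foo := by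
  intro nums _
  unfold Spec_foo foo foo_alt
  have := loop_spec nums [] 0 0 PySem.Dict.empty PySem.Dict.empty
    (by simp) (by simp) (by intro v; simp [PySem.Dict.getD_empty])
    (by intro v; simp [PySem.Dict.getD_empty, lastIdx])
  simpa using this
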